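-- pv_equiv track=rewrite | github.com/alopgau/MisCosas | CalculadoraBinario/calculadorabinario.py | comprobarceroyuno
-- ===== SOURCE A (Python) =====
-- def comprobarceroyuno(binario):
--     """Función que comprueba si todos los digitos de los binarios son 0 o 1"""
--     contador = 0
--     for digito in binario:
--
--         if digito != "1" and digito != "0":
--
--             contador += 1
--
--             if contador == 0:
--                 return True
--             else:
--                 return False
-- ===== SOURCE B (Python) =====
-- def comprobarceroyuno(binario):
--     """Función que comprueba si todos los digitos de los binarios son 0 o 1"""
--     if set(binario) - {"0", "1"}:
--         return False
-- ===== Notes on version B (the rewrite author's own statement) =====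
-- stated objective: idiomatic
-- what changed: Replaces the per-character scan with early return by one bulk set-difference test: build the set of distinct characters and subtract {'0','1'}; return False iff the difference is non-empty, otherwise fall through to None.
import Mathlib
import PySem

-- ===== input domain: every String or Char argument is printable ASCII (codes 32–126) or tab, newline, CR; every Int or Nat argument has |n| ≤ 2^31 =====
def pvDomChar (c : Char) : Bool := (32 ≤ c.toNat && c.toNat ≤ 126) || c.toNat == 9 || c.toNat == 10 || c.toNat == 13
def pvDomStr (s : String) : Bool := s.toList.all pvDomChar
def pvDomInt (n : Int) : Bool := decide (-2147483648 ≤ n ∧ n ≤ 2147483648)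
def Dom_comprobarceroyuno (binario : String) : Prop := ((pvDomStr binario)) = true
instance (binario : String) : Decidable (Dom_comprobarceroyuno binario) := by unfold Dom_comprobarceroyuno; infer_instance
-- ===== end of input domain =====

-- B replaces A's per-character scan with a single bulk set-difference test (distinct chars minus the allowed set), a more idiomatic membership check; same return convention (None on success, False otherwise).


-- ===== PORT A =====
-- recursive helper = A's for-loop over the characters, carrying contador
def comprobarceroyunoGo : List Char → Int → Option Bool
  | [], _ => none
  | digito :: rest, contador =>
    if digito ≠ '1' ∧ digito ≠ '0' then
      if contador + 1 = 0 then some true else some false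
    else comprobarceroyunoGo rest contador

def comprobarceroyuno (binario : String) : Option Bool :=
  comprobarceroyunoGo binario.toList 0

-- ===== PORT B =====
def comprobarceroyuno_alt (binario : String) : Option Bool :=
  if PySem.Set.diff (PySem.Set.ofList binario.toList) ['0', '1'] ≠ [] then some false
  else none

-- ===== PRECONDITION & SPEC =====
def Spec_comprobarceroyuno (binario : String) (out : Option Bool) : Prop := out = comprobarceroyuno_alt binario
instance (binario : String) (out : Option Bool) : Decidable (Spec_comprobarceroyuno binario out) := by unfold Spec_comprobarceroyuno; infer_instance

-- ===== CLAIM (what is proved, stated in full; the proofs are below) =====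
def Claim_equal_comprobarceroyuno : Prop := ∀ (binario : String), Dom_comprobarceroyuno binario → Spec_comprobarceroyuno binario (comprobarceroyuno binario)

-- ===== LEMMAS AND PROOFS =====

-- ===== VERDICT (by name: the statement is the Claim_ definition above) =====
lemma diff_nil_iff (l : List Char) :
    PySem.Set.diff (PySem.Set.ofList l) ['0', '1'] = [] ↔ ∀ y ∈ l, y = '0' ∨ y = '1' := by
  rw [List.eq_nil_iff_forall_not_mem]
  constructor
  · intro h y hy
    by_contra hc
    push Not at hc
    exact h y (by
      rw [PySem.Set.mem_diff, PySem.Set.mem_ofList]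
      refine ⟨hy, ?_⟩
      simp [hc.1, hc.2])
  · intro h y hy
    rw [PySem.Set.mem_diff, PySem.Set.mem_ofList] at hy
    rcases h y hy.1 with h0 | h1
    · simp [h0] at hy
    · simp [h1] at hy

lemma go_eq (l : List Char) :
    comprobarceroyunoGo l 0 =
      if ∀ y ∈ l, y = '0' ∨ y = '1' then none else some false := by
  induction l with
  | nil => simp [comprobarceroyunoGo]
  | cons c rest ih =>
    by_cases hc : c ≠ '1' ∧ c ≠ '0'
    · have hall : ¬ ∀ y ∈ c :: rest, y = '0' ∨ y = '1' := fun h =>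
        absurd (h c (by simp)) (by tauto)
      simp only [comprobarceroyunoGo, if_pos hc, if_neg hall]
      norm_num
    · push Not at hc
      by_cases h1 : c = '1'
      · simp [comprobarceroyunoGo, h1, ih]
      · simp [comprobarceroyunoGo, hc h1, ih]

theorem comprobarceroyuno_spec : Claim_equal_comprobarceroyuno := by
  intro binario _
  unfold Spec_comprobarceroyuno comprobarceroyuno comprobarceroyuno_alt
  rw [go_eq]
  by_cases h : ∀ y ∈ binario.toList, y = '0' ∨ y = '1'
  · simp only [if_pos h, (diff_nil_iff _).mpr h, ne_eq, not_true_eq_false, if_false]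
  · have : PySem.Set.diff (PySem.Set.ofList binario.toList) ['0', '1'] ≠ [] := by
      intro he; exact h ((diff_nil_iff _).mp he)
    simp [h, this]
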